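-- pv_equiv track=rewrite | github.com/devinmboyle/Djikstra-Exercise-in-Python | bluesparrow.py | find_index_of_minimum
-- ===== SOURCE A (Python) =====
-- def find_index_of_minimum(distance, queue):
--
--     minimum = float('inf')
--     index_of_minimum = -1
--
--     for i in range(len(distance)):
--         if (distance[i] < minimum and i in queue):
--             minimum = distance[i]
--             index_of_minimum = i
--
--     return index_of_minimum
-- ===== SOURCE B (Python) =====
-- def find_index_of_minimum(distance, queue):
--     valid = {i for i in queue if 0 <= i < len(distance)}
--     if not valid:
--         return -1
--     m = min(distance[i] for i in valid)
--     return min(i for i in valid if distance[i] == m)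
-- ===== Notes on version B (the rewrite author's own statement) =====
-- stated objective: alternative
-- what changed: Replaces A's single running-min-and-index scan over range(len(distance)) (with an 'i in queue' membership scan inside the loop) by a filter-then-min-then-argmin decomposition: build the set of in-range queued indices, take the minimum distance over it, then return the smallest index achieving it.
import Mathlib
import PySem

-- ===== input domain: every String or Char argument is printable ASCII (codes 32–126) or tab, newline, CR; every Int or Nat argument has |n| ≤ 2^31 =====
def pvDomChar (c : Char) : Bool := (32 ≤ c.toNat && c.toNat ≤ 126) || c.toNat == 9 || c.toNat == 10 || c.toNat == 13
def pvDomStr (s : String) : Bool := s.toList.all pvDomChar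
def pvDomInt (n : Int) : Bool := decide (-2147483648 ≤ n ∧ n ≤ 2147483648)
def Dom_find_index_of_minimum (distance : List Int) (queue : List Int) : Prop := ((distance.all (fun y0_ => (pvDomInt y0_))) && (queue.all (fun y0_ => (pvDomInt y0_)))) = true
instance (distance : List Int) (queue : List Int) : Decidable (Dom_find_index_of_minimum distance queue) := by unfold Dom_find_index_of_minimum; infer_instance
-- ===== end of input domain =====

-- B replaces A's single running-min-and-index scan over range(len(distance)) by a
-- filter-then-min-then-argmin decomposition over the queue (objective: alternative).

-- ===== PORT A =====
-- one scan step of A's loop: 'if distance[i] < minimum and i in queue: update';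
-- 'minimum = float('inf')' is the state 'none' (every int is < inf)
def pvStepA (queue : List Int) (st : Option Int × Int) (p : Int × Nat) : Option Int × Int :=
  if ((match st.1 with | none => true | some m => decide (p.1 < m)) && queue.contains ((p.2 : Int))) = true
  then (some p.1, (p.2 : Int)) else st

def find_index_of_minimum (distance : List Int) (queue : List Int) : Int :=
  (distance.zipIdx.foldl (pvStepA queue) (none, -1)).2

-- ===== PORT B =====
def find_index_of_minimum_alt (distance : List Int) (queue : List Int) : Int :=
  let n : Int := distance.length
  let valid : PySem.Set Int :=
    PySem.Set.ofList (queue.filter (fun i => decide (0 ≤ i) && decide (i < n)))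
  if valid = [] then -1
  else
    match PySem.List.min? (valid.map (fun i => (PySem.List.pyGet? distance i).getD 0)) (fun x => x) with
    | none => -1
    | some m =>
      (PySem.List.min? (valid.filter (fun i => (PySem.List.pyGet? distance i).getD 0 == m)) (fun x => x)).getD (-1)

-- ===== PRECONDITION & SPEC =====
def Spec_find_index_of_minimum (distance : List Int) (queue : List Int) (out : Int) : Prop := out = find_index_of_minimum_alt distance queue
instance (distance : List Int) (queue : List Int) (out : Int) : Decidable (Spec_find_index_of_minimum distance queue out) := by unfold Spec_find_index_of_minimum; infer_instance

-- ===== CLAIM (what is proved, stated in full; the proofs are below) =====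
def Claim_equal_find_index_of_minimum : Prop := ∀ (distance : List Int) (queue : List Int), Dom_find_index_of_minimum distance queue → Spec_find_index_of_minimum distance queue (find_index_of_minimum distance queue)

-- ===== LEMMAS AND PROOFS =====

-- the "first strict minimum below bound mo" scan that A's fold computes
def pvG (queue : List Int) (mo : Option Int) : List (Int × Nat) → Option (Int × Nat)
  | [] => none
  | p :: l =>
    if ((match mo with | none => true | some m => decide (p.1 < m)) && queue.contains ((p.2 : Int))) = true
    then match pvG queue (some p.1) l with
         | none => some p
         | some q => some q
    else pvG queue mo l

lemma pvFold_eq (queue : List Int) (l : List (Int × Nat)) :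
    ∀ (mo : Option Int) (j : Int),
      l.foldl (pvStepA queue) (mo, j) =
        (match pvG queue mo l with
         | none => (mo, j)
         | some r => (some r.1, (r.2 : Int))) := by
  induction l with
  | nil => intro mo j; simp [pvG]
  | cons p l ih =>
    intro mo j
    simp only [List.foldl_cons, pvG, pvStepA]
    by_cases h : ((match mo with | none => true | some m => decide (p.1 < m)) && queue.contains ((p.2 : Int))) = true
    · rw [if_pos h, if_pos h, ih]
      cases pvG queue (some p.1) l <;> rfl
    · rw [if_neg h, if_neg h, ih]

def pvLt (d : Int) (mo : Option Int) : Prop := match mo with | none => True | some m => d < m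

lemma pvG_spec (queue : List Int) (l : List (Int × Nat)) :
    ∀ (mo : Option Int), l.Pairwise (fun a b => a.2 < b.2) →
      (match pvG queue mo l with
       | none => ∀ q ∈ l, pvLt q.1 mo → (q.2 : Int) ∈ queue → False
       | some r => r ∈ l ∧ pvLt r.1 mo ∧ (r.2 : Int) ∈ queue ∧
           ∀ q ∈ l, pvLt q.1 mo → (q.2 : Int) ∈ queue →
             r.1 ≤ q.1 ∧ (q.1 = r.1 → r.2 ≤ q.2)) := by
  induction l with
  | nil => intro mo _; simp [pvG]
  | cons p l ih =>
    intro mo hpw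
    have hpw' := (List.pairwise_cons.mp hpw).2
    have hplt := (List.pairwise_cons.mp hpw).1
    simp only [pvG]
    by_cases h : ((match mo with | none => true | some m => decide (p.1 < m)) && queue.contains ((p.2 : Int))) = true
    · rw [if_pos h]
      have hq : (p.2 : Int) ∈ queue := by
        have := (Bool.and_eq_true _ _).mp h
        exact List.contains_iff_mem.mp this.2
      have hlt : pvLt p.1 mo := by
        have := (Bool.and_eq_true _ _).mp h
        cases mo with
        | none => trivial
        | some m => simpa [pvLt] using this.1
      have := ih (some p.1) hpw'
      cases hg : pvG queue (some p.1) l with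
      | none =>
        rw [hg] at this
        refine ⟨List.mem_cons_self, hlt, hq, ?_⟩
        intro q hql _ hqq
        rcases List.mem_cons.mp hql with h1 | h1
        · subst h1; exact ⟨le_refl _, fun _ => le_refl _⟩
        · have hnlt : ¬ q.1 < p.1 := fun hc => this q h1 (by simpa [pvLt] using hc) hqq
          constructor
          · omega
          · intro _; exact le_of_lt (hplt q h1)
      | some r =>
        rw [hg] at this
        obtain ⟨hrl, hrlt, hrq, hmin⟩ := this
        have hr1p : r.1 < p.1 := hrlt
        refine ⟨List.mem_cons_of_mem _ hrl, ?_, hrq, ?_⟩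
        · cases mo with
          | none => trivial
          | some m => exact lt_trans hr1p hlt
        · intro q hql hqlt hqq
          rcases List.mem_cons.mp hql with h1 | h1
          · subst h1
            exact ⟨le_of_lt hr1p, fun he => absurd he (by omega)⟩
          · by_cases hc : q.1 < p.1
            · exact hmin q h1 (by simpa [pvLt] using hc) hqq
            · constructor
              · omega
              · intro he; omega
    · rw [if_neg h]
      have hfail : ¬ (pvLt p.1 mo ∧ (p.2 : Int) ∈ queue) := by
        intro ⟨h1, h2⟩
        apply h
        refine (Bool.and_eq_true _ _).mpr ⟨?_, List.contains_iff_mem.mpr h2⟩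
        cases mo with
        | none => rfl
        | some m => simpa [pvLt] using h1
      have := ih mo hpw'
      cases hg : pvG queue mo l with
      | none =>
        rw [hg] at this
        intro q hql hqlt hqq
        rcases List.mem_cons.mp hql with h1 | h1
        · subst h1; exact hfail ⟨hqlt, hqq⟩
        · exact this q h1 hqlt hqq
      | some r =>
        rw [hg] at this
        obtain ⟨hrl, hrlt, hrq, hmin⟩ := this
        refine ⟨List.mem_cons_of_mem _ hrl, hrlt, hrq, ?_⟩
        intro q hql hqlt hqq
        rcases List.mem_cons.mp hql with h1 | h1
        · subst h1; exact absurd ⟨hqlt, hqq⟩ hfail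
        · exact hmin q h1 hqlt hqq

lemma pv_mem_zipIdx {l : List Int} {p : Int × Nat} : p ∈ l.zipIdx ↔ l[p.2]? = some p.1 := by
  rw [List.mem_iff_getElem?]
  constructor
  · rintro ⟨i, hi⟩
    rw [List.getElem?_zipIdx] at hi
    cases h : l[i]? with
    | none => rw [h] at hi; simp at hi
    | some a =>
      rw [h] at hi
      simp only [Option.map_some, Option.some.injEq] at hi
      rw [← hi]; simpa using h
  · intro h
    exact ⟨p.2, by rw [List.getElem?_zipIdx, h]; simp⟩

lemma pv_pairwise_zipIdx (l : List Int) : l.zipIdx.Pairwise (fun a b => a.2 < b.2) := by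
  rw [List.pairwise_iff_getElem]
  intro i j hi hj hij
  simp only [List.length_zipIdx] at hi hj
  simp [List.getElem_zipIdx, hij]

theorem find_index_of_minimum_spec : Claim_equal_find_index_of_minimum := by
  intro distance queue _
  unfold Spec_find_index_of_minimum
  unfold find_index_of_minimum
  rw [pvFold_eq queue distance.zipIdx none (-1)]
  have hspec := pvG_spec queue distance.zipIdx none (pv_pairwise_zipIdx distance)
  simp only [find_index_of_minimum_alt]
  set n : Int := (distance.length : Int) with hn
  set f : Int → Int := fun i => (PySem.List.pyGet? distance i).getD 0 with hf
  set valid : List Int := PySem.Set.ofList (queue.filter (fun i => decide (0 ≤ i) && decide (i < n))) with hv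
  have hmemv : ∀ i : Int, i ∈ valid ↔ i ∈ queue ∧ 0 ≤ i ∧ i < n := by
    intro i
    rw [hv, PySem.Set.mem_ofList, List.mem_filter]
    simp [Bool.and_eq_true]
  simp only [show ∀ i : Int, (PySem.List.pyGet? distance i).getD 0 = f i from fun _ => rfl]
  have hfval : ∀ k : Nat, k < distance.length → ∀ x, distance[k]? = some x → f ((k : Nat) : Int) = x := by
    intro k hk x hx
    rw [hf]
    simp only [PySem.List.pyGet?_natCast, hx, Option.getD_some]
  cases hg : pvG queue none distance.zipIdx with
  | none =>
    rw [hg] at hspec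
    have hspec' : ∀ q ∈ distance.zipIdx, pvLt q.1 none → (q.2 : Int) ∈ queue → False := hspec
    show (-1 : Int) = _
    have hvempty : valid = [] := by
      rcases List.eq_nil_or_concat valid with h | ⟨l', i, h⟩
      · exact h
      · exfalso
        have hi : i ∈ valid := by simp [h]
        obtain ⟨hiq, h0, hlt⟩ := (hmemv i).mp hi
        have hk : i.toNat < distance.length := by omega
        have hz : (distance[i.toNat], i.toNat) ∈ distance.zipIdx :=
          pv_mem_zipIdx.mpr (by simp [List.getElem?_eq_getElem hk])
        exact hspec' _ hz trivial (by simpa [Int.toNat_of_nonneg h0] using hiq)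
    simp [hvempty]
  | some r =>
    rw [hg] at hspec
    obtain ⟨hrz, -, hrq, hmin⟩ :
        r ∈ distance.zipIdx ∧ pvLt r.1 none ∧ (r.2 : Int) ∈ queue ∧
          ∀ q ∈ distance.zipIdx, pvLt q.1 none → (q.2 : Int) ∈ queue →
            r.1 ≤ q.1 ∧ (q.1 = r.1 → r.2 ≤ q.2) := hspec
    show ((r.2 : Nat) : Int) = _
    have hrg : distance[r.2]? = some r.1 := pv_mem_zipIdx.mp hrz
    have hr2len : r.2 < distance.length := by
      by_contra hc
      rw [List.getElem?_eq_none_iff.mpr (by omega)] at hrg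
      simp at hrg
    have hrv : ((r.2 : Nat) : Int) ∈ valid :=
      (hmemv _).mpr ⟨hrq, by positivity, by rw [hn]; exact_mod_cast hr2len⟩
    have hfr : f ((r.2 : Nat) : Int) = r.1 := hfval r.2 hr2len r.1 hrg
    -- every member of valid corresponds to a zipIdx candidate, giving the scan's minimality facts
    have hkey : ∀ i ∈ valid, r.1 ≤ f i ∧ (f i = r.1 → ((r.2 : Nat) : Int) ≤ i) := by
      intro i hi
      obtain ⟨hiq, h0, hlt⟩ := (hmemv i).mp hi
      have hk : i.toNat < distance.length := by omega
      have hz : (distance[i.toNat], i.toNat) ∈ distance.zipIdx :=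
        pv_mem_zipIdx.mpr (by simp [List.getElem?_eq_getElem hk])
      have hfi : f i = distance[i.toNat] := by
        have := hfval i.toNat hk distance[i.toNat] (List.getElem?_eq_getElem hk)
        rwa [Int.toNat_of_nonneg h0] at this
      have := hmin _ hz trivial (by simpa [Int.toNat_of_nonneg h0] using hiq)
      refine ⟨by rw [hfi]; exact this.1, ?_⟩
      intro he
      have h2 : r.2 ≤ i.toNat := this.2 (by rw [← hfi]; exact he)
      omega
    have hvne : ¬ valid = [] := by
      intro h; rw [h] at hrv; exact List.not_mem_nil hrv
    rw [if_neg hvne]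
    have hr1mem : r.1 ∈ valid.map f := by
      exact List.mem_map.mpr ⟨_, hrv, hfr⟩
    cases hm : PySem.List.min? (valid.map f) (fun x => x) with
    | none =>
      exfalso
      rw [PySem.List.min?_eq_none_iff] at hm
      rw [hm] at hr1mem
      exact List.not_mem_nil hr1mem
    | some m =>
      have hmmem := PySem.List.min?_mem hm
      have hmmin := PySem.List.min?_isMin hm
      have hmr : m = r.1 := by
        obtain ⟨i0, hi0, hfi0⟩ := List.mem_map.mp hmmem
        have h1 : r.1 ≤ m := by rw [← hfi0]; exact (hkey i0 hi0).1
        have h2 : m ≤ r.1 := hmmin r.1 hr1mem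
        omega
      have hrL2 : ((r.2 : Nat) : Int) ∈ valid.filter (fun i => f i == m) := by
        rw [List.mem_filter]
        exact ⟨hrv, by rw [hfr, hmr]; exact beq_self_eq_true r.1⟩
      cases hm2 : PySem.List.min? (valid.filter (fun i => f i == m)) (fun x => x) with
      | none =>
        exfalso
        rw [PySem.List.min?_eq_none_iff] at hm2
        rw [hm2] at hrL2
        exact List.not_mem_nil hrL2
      | some k =>
        have hkmem := PySem.List.min?_mem hm2
        have hkmin := PySem.List.min?_isMin hm2
        rw [List.mem_filter] at hkmem
        have hfk : f k = r.1 := by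
          have := hkmem.2
          rw [beq_iff_eq] at this
          rw [this, hmr]
        have h1 : k ≤ ((r.2 : Nat) : Int) := hkmin _ hrL2
        have h2 : ((r.2 : Nat) : Int) ≤ k := (hkey k hkmem.1).2 hfk
        simp only [hm2, Option.getD_some]
        omega
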